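-- pv_equiv track=rewrite | github.com/Shadowmeth/DSA | dynamic_programming.py | add_until_100
-- ===== SOURCE A (Python) =====
-- def add_until_100(array):
--     if not array:
--         return 0
--     until_100 = add_until_100(array[1:])
--     if array[0] + until_100 > 100:
--         return until_100
--     else:
--         return array[0] + until_100
-- ===== SOURCE B (Python) =====
-- def add_until_100(array):
--     total = 0
--     for x in reversed(array):
--         if x + total > 100:
--             continue
--         total = x + total
--     return total
-- ===== Notes on version B (the rewrite author's own statement) =====
-- stated objective: faster
-- what changed: Replaced the recursion with O(n) slice copies per step by a single iterative right-to-left pass with a running total.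
import Mathlib
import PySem

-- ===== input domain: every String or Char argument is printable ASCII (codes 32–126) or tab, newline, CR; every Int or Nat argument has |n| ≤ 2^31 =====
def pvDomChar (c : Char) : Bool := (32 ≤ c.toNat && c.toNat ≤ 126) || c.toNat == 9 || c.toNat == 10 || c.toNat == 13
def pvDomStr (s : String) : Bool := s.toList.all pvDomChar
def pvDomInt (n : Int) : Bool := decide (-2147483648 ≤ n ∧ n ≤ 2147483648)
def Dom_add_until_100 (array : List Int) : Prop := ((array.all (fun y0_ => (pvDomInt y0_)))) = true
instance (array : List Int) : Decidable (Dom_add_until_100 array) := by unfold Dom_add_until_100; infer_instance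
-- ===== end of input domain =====

-- B replaces A's slicing recursion by a single iterative right-to-left pass with a running total (faster: asymptotic).

-- ===== PORT A =====
def add_until_100 (array : List Int) : Int :=
  match array with
  | [] => 0
  | x :: rest =>
    let until_100 := add_until_100 rest
    if x + until_100 > 100 then until_100 else x + until_100

-- ===== PORT B =====
def add_until_100_alt (array : List Int) : Int :=
  array.reverse.foldl (fun total x => if x + total > 100 then total else x + total) 0

-- ===== PRECONDITION & SPEC =====
def Spec_add_until_100 (array : List Int) (out : Int) : Prop := out = add_until_100_alt array
instance (array : List Int) (out : Int) : Decidable (Spec_add_until_100 array out) := by unfold Spec_add_until_100; infer_instance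

-- ===== CLAIM (what is proved, stated in full; the proofs are below) =====
def Claim_equal_add_until_100 : Prop := ∀ (array : List Int), Dom_add_until_100 array → Spec_add_until_100 array (add_until_100 array)

-- ===== LEMMAS AND PROOFS =====
theorem add_until_100_alt_eq (array : List Int) : add_until_100_alt array = add_until_100 array := by
  unfold add_until_100_alt
  rw [List.foldl_reverse]
  induction array with
  | nil => simp [add_until_100]
  | cons x rest ih => simp [add_until_100, List.foldr, ih]

-- ===== VERDICT (by name: the statement is the Claim_ definition above) =====
theorem add_until_100_spec : Claim_equal_add_until_100 := by
  intro array _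
  unfold Spec_add_until_100
  exact (add_until_100_alt_eq array).symm
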